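-- pv_equiv track=rewrite | github.com/fedestrauch/Minisoft-Packing | shipprimus_app/arcbest_client.py | _build_accessorial_params
-- ===== SOURCE A (Python) =====
-- PRIMUS_TO_ABF_ACC = {
--     "LFO": "LGPU",
--     "LFD": "LGDL",
--     "RSO": "RDP",
--     "RSD": "RDD",
--     "INO": "INPU",
--     "IND": "INDL",
--     "APD": "APPT",
--     "NTD": "NTFY",
-- }
--
-- def _map_accessorials(codes: list[str] | None) -> list[str]:
--     result: list[str] = []
--     for code in codes or []:
--         value = PRIMUS_TO_ABF_ACC.get((code or "").strip().upper(), (code or "").strip().upper())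
--         if value and value not in result:
--             result.append(value)
--     return result
--
-- def _build_accessorial_params(
--     flags_map: dict[str, str],
--     codes: list[str] | None,
-- ) -> dict[str, str]:
--     params: dict[str, str] = {}
--     for code in _map_accessorials(codes):
--         flag = flags_map.get(code)
--         if flag:
--             params[flag] = "Y"
--     return params
-- ===== SOURCE B (Python) =====
-- PRIMUS_TO_ABF_ACC = {
--     "LFO": "LGPU",
--     "LFD": "LGDL",
--     "RSO": "RDP",
--     "RSD": "RDD",
--     "INO": "INPU",
--     "IND": "INDL",
--     "APD": "APPT",
--     "NTD": "NTFY",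
-- }
--
-- def _build_accessorial_params(flags_map, codes):
--     # single pass: normalize, translate, look up the flag; the params dict
--     # dedups by key (first-occurrence order) so no separate dedup list is needed
--     params = {}
--     for code in codes or []:
--         value = (code or "").strip().upper()
--         value = PRIMUS_TO_ABF_ACC.get(value, value)
--         if value:
--             flag = flags_map.get(value)
--             if flag:
--                 params[flag] = "Y"
--     return params
-- ===== Notes on version B (the rewrite author's own statement) =====
-- stated objective: simpler
-- what changed: Fuses the separate ordered-dedup helper pass and the flag-lookup pass into one loop over codes, relying on dict key insertion semantics (overwrite keeps position) to deduplicate, which removes the O(n) 'value not in result' list scan inside A's loop.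
import Mathlib
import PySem

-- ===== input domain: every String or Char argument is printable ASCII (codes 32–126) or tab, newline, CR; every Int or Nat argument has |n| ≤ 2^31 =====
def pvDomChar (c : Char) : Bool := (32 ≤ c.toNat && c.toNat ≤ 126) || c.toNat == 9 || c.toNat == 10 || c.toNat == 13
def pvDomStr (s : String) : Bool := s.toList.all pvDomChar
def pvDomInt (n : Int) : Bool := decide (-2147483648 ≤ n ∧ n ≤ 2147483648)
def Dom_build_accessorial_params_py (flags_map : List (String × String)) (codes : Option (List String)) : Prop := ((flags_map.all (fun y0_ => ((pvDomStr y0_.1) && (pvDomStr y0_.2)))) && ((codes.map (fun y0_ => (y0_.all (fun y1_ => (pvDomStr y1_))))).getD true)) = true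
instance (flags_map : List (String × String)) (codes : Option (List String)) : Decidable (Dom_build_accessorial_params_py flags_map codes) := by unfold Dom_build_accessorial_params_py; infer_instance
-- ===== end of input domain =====

-- B fuses A's two passes (ordered-dedup helper + flag-lookup loop) into one pass over the codes,
-- letting the params dict deduplicate by key; equal return value, no observable side effects.

-- ===== PORT A =====
-- module constant PRIMUS_TO_ABF_ACC (shared by both ports, as in the Python module)
def PRIMUS_TO_ABF_ACC : PySem.Dict String String :=
  PySem.Dict.mk [("LFO","LGPU"),("LFD","LGDL"),("RSO","RDP"),("RSD","RDD"),
                 ("INO","INPU"),("IND","INDL"),("APD","APPT"),("NTD","NTFY")]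

-- helper _map_accessorials: normalize each code, translate, ordered dedup (empty strings dropped)
def map_accessorials (codes : Option (List String)) : List String :=
  (codes.getD []).foldl
    (fun result code =>
      let value := PRIMUS_TO_ABF_ACC.getD (PySem.Str.upper (PySem.Str.strip code))
                                          (PySem.Str.upper (PySem.Str.strip code))
      if value ≠ "" ∧ value ∉ result then result ++ [value] else result)
    []

def build_accessorial_params_py (flags_map : List (String × String)) (codes : Option (List String)) : List (String × String) :=
  ((map_accessorials codes).foldl
    (fun params code =>
      match (PySem.Dict.mk flags_map).get? code with
      | some flag => if flag ≠ "" then params.insert flag "Y" else params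
      | none => params)
    PySem.Dict.empty).items

-- ===== PORT B =====
def build_accessorial_params_py_alt (flags_map : List (String × String)) (codes : Option (List String)) : List (String × String) :=
  ((codes.getD []).foldl
    (fun params code =>
      let value := PySem.Str.upper (PySem.Str.strip code)
      let value := PRIMUS_TO_ABF_ACC.getD value value
      if value ≠ "" then
        match (PySem.Dict.mk flags_map).get? value with
        | some flag => if flag ≠ "" then params.insert flag "Y" else params
        | none => params
      else params)
    PySem.Dict.empty).items

-- ===== PRECONDITION & SPEC =====
def Spec_build_accessorial_params_py (flags_map : List (String × String)) (codes : Option (List String)) (out : List (String × String)) : Prop := out = build_accessorial_params_py_alt flags_map codes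
instance (flags_map : List (String × String)) (codes : Option (List String)) (out : List (String × String)) : Decidable (Spec_build_accessorial_params_py flags_map codes out) := by unfold Spec_build_accessorial_params_py; infer_instance

-- ===== CLAIM (what is proved, stated in full; the proofs are below) =====
def Claim_equal_build_accessorial_params_py : Prop := ∀ (flags_map : List (String × String)) (codes : Option (List String)), Dom_build_accessorial_params_py flags_map codes → Spec_build_accessorial_params_py flags_map codes (build_accessorial_params_py flags_map codes)

-- ===== LEMMAS AND PROOFS =====

-- the normalized/translated value of one code (both loop bodies compute it)
def pvVal (code : String) : String :=
  PRIMUS_TO_ABF_ACC.getD (PySem.Str.upper (PySem.Str.strip code))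
                         (PySem.Str.upper (PySem.Str.strip code))

-- one step of the flag-lookup loop (A's second loop body; B's body behind its guard)
def pvStep (F p : PySem.Dict String String) (v : String) : PySem.Dict String String :=
  match F.get? v with
  | some flag => if flag ≠ "" then p.insert flag "Y" else p
  | none => p

-- A's dedup-loop body and B's loop body, named (each is `rfl`-equal to the port's lambda)
def pvDedupF : List String → String → List String :=
  fun result code =>
    let value := PRIMUS_TO_ABF_ACC.getD (PySem.Str.upper (PySem.Str.strip code))
                                        (PySem.Str.upper (PySem.Str.strip code))
    if value ≠ "" ∧ value ∉ result then result ++ [value] else result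

def pvBF (F : PySem.Dict String String) : PySem.Dict String String → String → PySem.Dict String String :=
  fun q c => if pvVal c ≠ "" then pvStep F q (pvVal c) else q

lemma pvDedupF_eq (r : List String) (c : String) :
    pvDedupF r c = if pvVal c ≠ "" ∧ pvVal c ∉ r then r ++ [pvVal c] else r := rfl

lemma pvBF_eq (F : PySem.Dict String String) (p : PySem.Dict String String) (c : String) :
    pvBF F p c = if pvVal c ≠ "" then pvStep F p (pvVal c) else p := rfl

-- the values A's dedup pass appends when started with accumulator r
def pvNew : List String → List String → List String
  | [], _ => []
  | c :: cs', r =>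
    if pvVal c ≠ "" ∧ pvVal c ∉ r then pvVal c :: pvNew cs' (r ++ [pvVal c]) else pvNew cs' r

lemma pvDedup_eq (cs : List String) : ∀ r : List String,
    cs.foldl pvDedupF r = r ++ pvNew cs r := by
  induction cs with
  | nil => intro r; simp [pvNew]
  | cons c cs ih =>
    intro r
    rw [List.foldl_cons, pvDedupF_eq]
    by_cases h : pvVal c ≠ "" ∧ pvVal c ∉ r
    · rw [if_pos h, ih (r ++ [pvVal c])]
      rw [show pvNew (c :: cs) r = pvVal c :: pvNew cs (r ++ [pvVal c]) from by rw [pvNew, if_pos h]]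
      simp
    · rw [if_neg h, ih r]
      rw [show pvNew (c :: cs) r = pvNew cs r from by rw [pvNew, if_neg h]]

lemma pvStep_some (F p : PySem.Dict String String) (v f : String) (hF : F.get? v = some f) :
    pvStep F p v = if f ≠ "" then p.insert f "Y" else p := by
  unfold pvStep; rw [hF]

lemma pvStep_none (F p : PySem.Dict String String) (v : String) (hF : F.get? v = none) :
    pvStep F p v = p := by
  unfold pvStep; rw [hF]

lemma pvInsert_same (p : PySem.Dict String String) (k : String)
    (hnd : p.keys.Nodup) (h : p.get? k = some "Y") : p.insert k "Y" = p := by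
  apply PySem.Dict.ext
  have hc : p.contains k = true := by
    rw [PySem.Dict.contains_eq_isSome_get?, h]; rfl
  rw [PySem.Dict.items_insert_of_contains p "Y" hc]
  have hmem : (k, "Y") ∈ p.items := (PySem.Dict.get?_eq_some_iff_mem_items p k "Y" hnd).mp h
  calc List.map (fun q => if (q.1 == k) = true then (k, "Y") else q) p.items
      = List.map id p.items := by
        apply List.map_congr_left
        intro q hq
        by_cases hk : (q.1 == k) = true
        · have : q = (k, "Y") := by
            apply List.inj_on_of_nodup_map (f := Prod.fst) hnd hq hmem
            simpa using hk
          simp [this]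
        · simp [hk]
    _ = p.items := List.map_id p.items

lemma pvStep_nodup (F p : PySem.Dict String String) (v : String)
    (h : p.keys.Nodup) : (pvStep F p v).keys.Nodup := by
  rcases hF : F.get? v with _ | f
  · rw [pvStep_none F p v hF]; exact h
  · rw [pvStep_some F p v f hF]
    by_cases hf : f ≠ ""
    · rw [if_pos hf]; exact PySem.Dict.nodup_keys_insert p f "Y" h
    · rw [if_neg hf]; exact h

lemma pvStep_mono (F p : PySem.Dict String String) (v k : String)
    (h : p.get? k = some "Y") : (pvStep F p v).get? k = some "Y" := by
  rcases hF : F.get? v with _ | f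
  · rw [pvStep_none F p v hF]; exact h
  · rw [pvStep_some F p v f hF]
    by_cases hf : f ≠ ""
    · rw [if_pos hf, PySem.Dict.get?_insert]
      split <;> simp [h]
    · rw [if_neg hf]; exact h

lemma pvStep_covers (F p : PySem.Dict String String) (v f : String)
    (hF : F.get? v = some f) (hf : f ≠ "") : (pvStep F p v).get? f = some "Y" := by
  rw [pvStep_some F p v f hF, if_pos hf]
  exact PySem.Dict.get?_insert_self p f "Y"

lemma pvStep_fixed (F p : PySem.Dict String String) (v : String)
    (hnd : p.keys.Nodup)
    (hcov : ∀ f, F.get? v = some f → f ≠ "" → p.get? f = some "Y") :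
    pvStep F p v = p := by
  rcases hF : F.get? v with _ | f
  · exact pvStep_none F p v hF
  · rw [pvStep_some F p v f hF]
    by_cases hf : f ≠ ""
    · rw [if_pos hf]
      exact pvInsert_same p f hnd (hcov f hF hf)
    · rw [if_neg hf]

-- main invariant: B's fused pass from state p equals A's flag-lookup pass over the values
-- A's dedup pass would still add, provided p already covers everything in the accumulator r
lemma pvMain (F : PySem.Dict String String) (cs : List String) :
    ∀ (r : List String) (p : PySem.Dict String String),
    p.keys.Nodup →
    (∀ v ∈ r, ∀ f, F.get? v = some f → f ≠ "" → p.get? f = some "Y") →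
    cs.foldl (pvBF F) p = (pvNew cs r).foldl (pvStep F) p := by
  induction cs with
  | nil =>
    intro r p _ _
    rw [show pvNew [] r = [] from rfl]
    simp only [List.foldl_nil]
  | cons c cs ih =>
    intro r p hnd hcov
    rw [List.foldl_cons, pvBF_eq]
    by_cases hv : pvVal c ≠ ""
    · by_cases hr : pvVal c ∈ r
      · -- duplicate value: A's dedup skips it, B's step is a no-op on p
        rw [if_pos hv, pvStep_fixed F p (pvVal c) hnd (hcov (pvVal c) hr)]
        rw [show pvNew (c :: cs) r = pvNew cs r from by rw [pvNew, if_neg (by simp [hv, hr])]]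
        exact ih r p hnd hcov
      · -- fresh value: both sides take one pvStep
        rw [if_pos hv]
        rw [show pvNew (c :: cs) r = pvVal c :: pvNew cs (r ++ [pvVal c]) from by
          rw [pvNew, if_pos ⟨hv, hr⟩]]
        rw [List.foldl_cons]
        apply ih (r ++ [pvVal c]) (pvStep F p (pvVal c)) (pvStep_nodup F p (pvVal c) hnd)
        intro v hvmem f hF hf
        rcases List.mem_append.mp hvmem with hvr | hveq
        · exact pvStep_mono F p (pvVal c) f (hcov v hvr f hF hf)
        · rw [List.mem_singleton] at hveq
          rw [hveq] at hF
          exact pvStep_covers F p (pvVal c) f hF hf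
    · rw [if_neg hv]
      rw [show pvNew (c :: cs) r = pvNew cs r from by rw [pvNew, if_neg (by simp [hv])]]
      exact ih r p hnd hcov

-- the ports' inline loop bodies are the named functions above
lemma pvBridgeA1 (codes : Option (List String)) :
    map_accessorials codes = (codes.getD []).foldl pvDedupF [] := rfl

lemma pvBridgeA2 (flags_map : List (String × String)) (codes : Option (List String)) :
    build_accessorial_params_py flags_map codes
      = ((map_accessorials codes).foldl (pvStep (PySem.Dict.mk flags_map)) PySem.Dict.empty).items := rfl

lemma pvBridgeB (flags_map : List (String × String)) (codes : Option (List String)) :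
    build_accessorial_params_py_alt flags_map codes
      = ((codes.getD []).foldl (pvBF (PySem.Dict.mk flags_map)) PySem.Dict.empty).items := rfl

-- ===== VERDICT (by name: the statement is the Claim_ definition above) =====
theorem build_accessorial_params_py_spec : Claim_equal_build_accessorial_params_py := by
  intro flags_map codes _
  unfold Spec_build_accessorial_params_py
  rw [pvBridgeA2, pvBridgeB, pvBridgeA1, pvDedup_eq, List.nil_append]
  exact congrArg PySem.Dict.items (pvMain (PySem.Dict.mk flags_map) (codes.getD []) [] PySem.Dict.empty
    (PySem.Dict.nodup_keys_empty (κ := String) (ν := String))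
    (by intro v hv; simp at hv)).symm
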